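-- pv_equiv track=rewrite | github.com/DivyR/Chess_Engine | chessPlayer.py | PositionRadius
-- ===== SOURCE A (Python) =====
-- def PositionRadius(position):  # helper to find piece distance from center
--    if position in [27, 28, 35, 26]:
--       return 0
--    c1 = 0
--    while (position - c1) % 8 != 0:
--       c1 += 1
--    if c1 == 0 or c1 == 7 or position - c1 == 56 or position - c1 == 0:
--       return 3
--    row = position//8
--    if row == 1 or row == 6 or (position + 2) % 8 == 0 or (position - 1) % 8 == 0:
--       return 2
--    else:
--       return 1
-- ===== SOURCE B (Python) =====
-- def PositionRadius(position):  # simpler: closed-form col/row + symmetric ring rank, no while loop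
--     if position in [27, 28, 35, 26]:
--         return 0
--     def rank(v):
--         if v in (0, 7):
--             return 3
--         if v in (1, 6):
--             return 2
--         return 1
--     return max(rank(position % 8), rank(position // 8))
-- ===== Notes on version B (the rewrite author's own statement) =====
-- stated objective: simpler
-- what changed: Replaces the while-loop search for the column and the asymmetric branch cascade with direct column/row arithmetic and a symmetric ring rank max(rank(col), rank(row)).
import Mathlib
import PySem

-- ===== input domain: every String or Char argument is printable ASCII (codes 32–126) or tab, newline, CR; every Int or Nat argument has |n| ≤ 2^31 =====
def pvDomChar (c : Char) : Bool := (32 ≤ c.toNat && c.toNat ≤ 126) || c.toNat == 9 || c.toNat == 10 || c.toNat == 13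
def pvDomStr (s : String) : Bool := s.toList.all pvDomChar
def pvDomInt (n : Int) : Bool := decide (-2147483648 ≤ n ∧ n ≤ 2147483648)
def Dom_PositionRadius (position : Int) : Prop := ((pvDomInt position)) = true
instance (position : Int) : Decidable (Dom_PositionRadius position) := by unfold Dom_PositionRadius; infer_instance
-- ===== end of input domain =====

-- B replaces A's while-loop column search and branch cascade with col/row arithmetic and a
-- symmetric ring rank; objective: simpler.

-- ===== PORT A =====
-- the 'while (position - c1) % 8 != 0: c1 += 1' loop, step for step
def PositionRadiusLoop (position c1 : Int) : Int :=
  if PySem.Int.mod (position - c1) 8 ≠ 0 then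
    PositionRadiusLoop position (c1 + 1)
  else c1
termination_by (PySem.Int.mod (position - c1) 8).toNat
decreasing_by
  rename_i h
  rw [PySem.Int.mod_eq_emod_of_pos (show (0:Int) < 8 by norm_num)] at h ⊢
  rw [PySem.Int.mod_eq_emod_of_pos (show (0:Int) < 8 by norm_num)]
  have h1 : 0 ≤ (position - c1) % 8 := Int.emod_nonneg _ (by norm_num)
  have h3 : position - (c1 + 1) = (position - c1) - 1 := by ring
  rw [h3]
  omega

def PositionRadius (position : Int) : Int :=
  if position = 27 ∨ position = 28 ∨ position = 35 ∨ position = 26 then 0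
  else
    let c1 := PositionRadiusLoop position 0
    if c1 = 0 ∨ c1 = 7 ∨ position - c1 = 56 ∨ position - c1 = 0 then 3
    else
      let row := PySem.Int.floordiv position 8
      if row = 1 ∨ row = 6 ∨ PySem.Int.mod (position + 2) 8 = 0 ∨ PySem.Int.mod (position - 1) 8 = 0 then 2
      else 1

-- ===== PORT B =====
def PositionRadiusRank (v : Int) : Int :=
  if v = 0 ∨ v = 7 then 3
  else if v = 1 ∨ v = 6 then 2
  else 1

def PositionRadius_alt (position : Int) : Int :=
  if position = 27 ∨ position = 28 ∨ position = 35 ∨ position = 26 then 0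
  else max (PositionRadiusRank (PySem.Int.mod position 8))
           (PositionRadiusRank (PySem.Int.floordiv position 8))

-- ===== PRECONDITION & SPEC =====
def Spec_PositionRadius (position : Int) (out : Int) : Prop := out = PositionRadius_alt position
instance (position : Int) (out : Int) : Decidable (Spec_PositionRadius position out) := by unfold Spec_PositionRadius; infer_instance

-- ===== CLAIM (what is proved, stated in full; the proofs are below) =====
def Claim_equal_PositionRadius : Prop := ∀ (position : Int), Dom_PositionRadius position → Spec_PositionRadius position (PositionRadius position)

-- ===== LEMMAS AND PROOFS =====

-- A's loop computes position % 8 (started at any c1 it computes c1 + (position - c1) % 8)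
theorem PositionRadiusLoop_eq (position : Int) : ∀ (c1 : Int),
    PositionRadiusLoop position c1 = c1 + (position - c1) % 8 := by
  intro c1
  induction c1 using PositionRadiusLoop.induct position with
  | case1 c1 h ih =>
    rw [PositionRadiusLoop, if_pos h, ih]
    rw [PySem.Int.mod_eq_emod_of_pos (show (0:Int) < 8 by norm_num)] at h
    have h1 : 0 ≤ (position - c1) % 8 := Int.emod_nonneg _ (by norm_num)
    have h2 : (position - c1) % 8 < 8 := Int.emod_lt_of_pos _ (by norm_num)
    have h3 : position - (c1 + 1) = (position - c1) - 1 := by ring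
    rw [h3]
    omega
  | case2 c1 h =>
    rw [PositionRadiusLoop, if_neg h]
    rw [PySem.Int.mod_eq_emod_of_pos (show (0:Int) < 8 by norm_num)] at h
    omega

-- ===== VERDICT (by name: the statement is the Claim_ definition above) =====
theorem PositionRadius_spec : Claim_equal_PositionRadius := by
  intro position _
  unfold Spec_PositionRadius PositionRadius PositionRadius_alt PositionRadiusRank
  have hloop : PositionRadiusLoop position 0 = position % 8 := by
    rw [PositionRadiusLoop_eq]
    omega
  rw [hloop]
  simp only [PySem.Int.mod_eq_emod_of_pos (show (0:Int) < 8 by norm_num),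
    PySem.Int.floordiv_eq_ediv_of_pos (show (0:Int) < 8 by norm_num)]
  split_ifs <;> omega
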